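-- pv_equiv track=rewrite | github.com/RusselMcGrady/SXHAGE | util/utils.py | index_for_feature_projection
-- ===== SOURCE A (Python) =====
-- def index_for_feature_projection(d, given_index):
--     sum_values = 0
--     for _, (key, value) in enumerate(d.items()):
--         if key != given_index:
--             sum_values += value
--         else:
--             break
--     return sum_values
-- ===== SOURCE B (Python) =====
-- def index_for_feature_projection(d, given_index):
--     keys = list(d)
--     vals = list(d.values())
--     if given_index in keys:
--         return sum(vals[:keys.index(given_index)])
--     return sum(vals)
-- ===== Notes on version B (the rewrite author's own statement) =====
-- stated objective: simpler
-- what changed: Replaces A's accumulate-until-break loop over items with an index-first decomposition: find the key's position in the key list and sum the prefix of the value list (or all values if absent).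
import Mathlib
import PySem

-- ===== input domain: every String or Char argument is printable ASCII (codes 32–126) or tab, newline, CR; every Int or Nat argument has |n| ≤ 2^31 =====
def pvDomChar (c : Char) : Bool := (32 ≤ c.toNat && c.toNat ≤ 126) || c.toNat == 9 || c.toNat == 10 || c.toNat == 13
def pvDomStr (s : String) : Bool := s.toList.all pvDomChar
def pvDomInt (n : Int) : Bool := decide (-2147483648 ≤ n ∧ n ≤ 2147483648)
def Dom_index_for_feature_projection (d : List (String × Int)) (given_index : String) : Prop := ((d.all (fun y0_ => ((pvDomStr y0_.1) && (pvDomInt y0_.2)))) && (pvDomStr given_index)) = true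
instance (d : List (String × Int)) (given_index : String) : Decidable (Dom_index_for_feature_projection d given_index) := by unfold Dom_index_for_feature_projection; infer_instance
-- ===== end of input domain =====

-- B replaces A's accumulate-until-break loop with an index-first decomposition (find the key's position, sum the value prefix); objective: simpler, not faster.


-- ===== PORT A =====
-- A: accumulate values until the key equals given_index (break), else sum all.
def index_for_feature_projection (d : List (String × Int)) (given_index : String) : Int :=
  match d with
  | [] => 0
  | (key, value) :: t =>
    if key ≠ given_index then value + index_for_feature_projection t given_index
    else 0

-- ===== PORT B =====
-- B: find the key's index in the key list, then sum the prefix of the value list.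
def index_for_feature_projection_alt (d : List (String × Int)) (given_index : String) : Int :=
  let keys := d.map Prod.fst
  let vals := d.map Prod.snd
  match PySem.List.index? keys given_index with
  | some i => (vals.take i).sum
  | none => vals.sum

-- ===== PRECONDITION & SPEC =====
def Spec_index_for_feature_projection (d : List (String × Int)) (given_index : String) (out : Int) : Prop := out = index_for_feature_projection_alt d given_index
instance (d : List (String × Int)) (given_index : String) (out : Int) : Decidable (Spec_index_for_feature_projection d given_index out) := by unfold Spec_index_for_feature_projection; infer_instance

-- ===== CLAIM (what is proved, stated in full; the proofs are below) =====
def Claim_equal_index_for_feature_projection : Prop := ∀ (d : List (String × Int)) (given_index : String), Dom_index_for_feature_projection d given_index → Spec_index_for_feature_projection d given_index (index_for_feature_projection d given_index)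

-- ===== LEMMAS AND PROOFS =====

-- ===== VERDICT (by name: the statement is the Claim_ definition above) =====
theorem index_for_feature_projection_spec : Claim_equal_index_for_feature_projection := by
  intro d given_index hdom
  clear hdom
  unfold Spec_index_for_feature_projection
  induction d with
  | nil => simp [index_for_feature_projection, index_for_feature_projection_alt]
  | cons h t ih =>
    obtain ⟨k, v⟩ := h
    by_cases hk : k = given_index
    · subst hk
      simp only [index_for_feature_projection, index_for_feature_projection_alt]
      simp only [List.map_cons]
      rw [PySem.List.index?_cons_self]
      simp
    · simp only [index_for_feature_projection, index_for_feature_projection_alt] at ih ⊢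
      simp only [List.map_cons]
      rw [PySem.List.index?_cons_of_ne _ hk]
      rcases hx : PySem.List.index? (t.map Prod.fst) given_index with _ | i <;>
        rw [hx] at ih <;> simp [hk] at ih ⊢ <;> omega
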